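-- pv_equiv track=rewrite | github.com/jacquerie/leetcode | leetcode/297_serialize_and_deserialize_binary_tree.py | parseSubtree
-- ===== SOURCE A (Python) =====
-- def parseSubtree(data, i):
--     n = 1
--     while n:
--         i += 1
--         if data[i] == '(':
--             n += 1
--         elif data[i] == ')':
--             n -= 1
--     return i + 1
-- ===== SOURCE B (Python) =====
-- def parseSubtree(data, i):
--     i += 1
--     while data[i] != ')':
--         if data[i] == '(':
--             i = parseSubtree(data, i)
--         else:
--             i += 1
--     return i + 1
-- ===== Notes on version B (the rewrite author's own statement) =====
-- stated objective: alternative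
-- what changed: Replaces A's flat scan with an integer depth counter by a recursive-descent parser that recurses into each nested '('-subtree and resumes the outer loop at the returned index.
import Mathlib
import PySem

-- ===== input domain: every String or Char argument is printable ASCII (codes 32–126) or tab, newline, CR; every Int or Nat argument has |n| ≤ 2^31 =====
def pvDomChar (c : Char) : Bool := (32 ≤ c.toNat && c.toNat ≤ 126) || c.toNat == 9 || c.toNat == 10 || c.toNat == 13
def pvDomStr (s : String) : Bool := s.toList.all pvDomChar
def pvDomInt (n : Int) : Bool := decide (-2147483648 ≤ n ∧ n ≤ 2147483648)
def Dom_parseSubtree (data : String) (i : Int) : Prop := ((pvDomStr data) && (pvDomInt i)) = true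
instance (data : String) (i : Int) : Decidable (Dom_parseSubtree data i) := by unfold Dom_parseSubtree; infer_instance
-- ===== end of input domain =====

-- B replaces A's flat depth-counter loop by recursive descent over the nesting structure
-- (objective: alternative decomposition, same cost). Equal return values on Pre_.

-- helper used by the ports' termination/fuel arguments
theorem pyGet?_some_lt_len {α : Type} {l : List α} {j : Int} {c : α}
    (h : PySem.List.pyGet? l j = some c) : j < (l.length : Int) := by
  by_contra hc
  have hn : PySem.List.pyGet? l j = none :=
    (PySem.List.pyGet?_eq_none_iff l j).mpr (by unfold PySem.Raise.InRange; omega)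
  simp [hn] at h

-- ===== PORT A =====
-- A's while-loop: n is the depth counter, i the cursor; data[i+1] is read each turn.
-- Where Python raises IndexError (pyGet? = none) the port returns 0; Pre_ excludes those inputs.
def loopA (l : List Char) (i n : Int) : Int :=
  if n = 0 then i + 1
  else
    match h : PySem.List.pyGet? l (i + 1) with
    | none => 0
    | some c =>
        loopA l (i + 1) (if c = '(' then n + 1 else if c = ')' then n - 1 else n)
termination_by ((l.length : Int) - i).toNat
decreasing_by
  have := pyGet?_some_lt_len h
  omega

def parseSubtree (data : String) (i : Int) : Int := loopA data.toList i 1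

-- ===== PORT B =====
-- B's while-loop, with the recursive parseSubtree(data, i) call inlined as its body
-- 'loop from i+1' (in Source B, parseSubtree(data, i) = loop starting at i+1).  The Nat
-- argument is fuel that only makes the recursion total; it is large enough on Pre_.
def loopB (l : List Char) : Nat → Int → Int
  | 0, _ => 0
  | f + 1, i =>
    match PySem.List.pyGet? l i with
    | none => 0
    | some c =>
        if c = ')' then i + 1
        else if c = '(' then loopB l f (loopB l f (i + 1))
        else loopB l f (i + 1)

def parseSubtree_alt (data : String) (i : Int) : Int :=
  loopB data.toList (data.toList.length + i.natAbs + 2) (i + 1)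

-- ===== PRECONDITION & SPEC =====
-- Pre_ is exactly the set of inputs on which Python's parseSubtree returns (no IndexError):
-- starting at index i+1 the scan must reach, while indices stay in range (negative start
-- indices wrap Python-style, whence the list t below), a point where the running depth
-- (1 + opens - closes) first hits 0.  Expressed in closed form: some prefix of the scanned
-- character list t contains exactly one more ')' than '('.
def scannedChars (data : String) (i : Int) : List Char :=
  let l := data.toList
  if i + 1 < 0 then l.drop (l.length + (i + 1)).toNat ++ l else l.drop (i + 1).toNat

def Pre_parseSubtree (data : String) (i : Int) : Prop :=
  -(data.toList.length : Int) ≤ i + 1 ∧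
  ∃ j < (scannedChars data i).length,
    ((((scannedChars data i).take (j + 1)).count ')' : Int) =
      1 + (((scannedChars data i).take (j + 1)).count '(' : Int))

instance (data : String) (i : Int) : Decidable (Pre_parseSubtree data i) := by
  unfold Pre_parseSubtree; infer_instance

def pvWitness_parseSubtree : String × Int := ("(2 (3) (4))", 0)

def Spec_parseSubtree (data : String) (i : Int) (out : Int) : Prop := out = parseSubtree_alt data i
instance (data : String) (i : Int) (out : Int) : Decidable (Spec_parseSubtree data i out) := by unfold Spec_parseSubtree; infer_instance

-- ===== CLAIM (what is proved, stated in full; the proofs are below) =====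
def Claim_equal_parseSubtree : Prop := ∀ (data : String) (i : Int), Dom_parseSubtree data i → Pre_parseSubtree data i → Spec_parseSubtree data i (parseSubtree data i)

-- ===== LEMMAS AND PROOFS =====

-- reference scan: A's loop with the IndexError made explicit (none)
def scan? (l : List Char) (i n : Int) : Option Int :=
  if n = 0 then some (i + 1)
  else
    match h : PySem.List.pyGet? l (i + 1) with
    | none => none
    | some c =>
        scan? l (i + 1) (if c = '(' then n + 1 else if c = ')' then n - 1 else n)
termination_by ((l.length : Int) - i).toNat
decreasing_by
  have := pyGet?_some_lt_len h
  omega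

-- equation lemmas for scan? and loopA (their definitional matches are dependent)
theorem scan?_zero (l : List Char) (i : Int) : scan? l i 0 = some (i + 1) := by
  rw [scan?]; simp

theorem scan?_none (l : List Char) (i n : Int) (hn : n ≠ 0)
    (h : PySem.List.pyGet? l (i + 1) = none) : scan? l i n = none := by
  rw [scan?, if_neg hn]; split <;> simp_all

theorem scan?_some (l : List Char) (i n : Int) (c : Char) (hn : n ≠ 0)
    (h : PySem.List.pyGet? l (i + 1) = some c) :
    scan? l i n = scan? l (i + 1) (if c = '(' then n + 1 else if c = ')' then n - 1 else n) := by
  rw [scan?, if_neg hn]; split <;> simp_all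

theorem loopA_zero (l : List Char) (i : Int) : loopA l i 0 = i + 1 := by
  rw [loopA]; simp

theorem loopA_none (l : List Char) (i n : Int) (hn : n ≠ 0)
    (h : PySem.List.pyGet? l (i + 1) = none) : loopA l i n = 0 := by
  rw [loopA, if_neg hn]; split <;> simp_all

theorem loopA_some (l : List Char) (i n : Int) (c : Char) (hn : n ≠ 0)
    (h : PySem.List.pyGet? l (i + 1) = some c) :
    loopA l i n = loopA l (i + 1) (if c = '(' then n + 1 else if c = ')' then n - 1 else n) := by
  rw [loopA, if_neg hn]; split <;> simp_all

-- a none result when the cursor has run off the right end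
theorem pyGet?_none_of_ge (l : List Char) (j : Int) (h : (l.length : Int) ≤ j) :
    PySem.List.pyGet? l j = none := by
  exact (PySem.List.pyGet?_eq_none_iff l j).mpr (by unfold PySem.Raise.InRange; omega)

theorem loopA_eq_scan?_aux (l : List Char) (m : Nat) :
    ∀ i n : Int, (l.length : Int) - i ≤ m → loopA l i n = (scan? l i n).getD 0 := by
  induction m with
  | zero =>
      intro i n hm
      by_cases hn : n = 0
      · subst hn; rw [loopA_zero, scan?_zero]; rfl
      · have h := pyGet?_none_of_ge l (i + 1) (by omega)
        rw [loopA_none l i n hn h, scan?_none l i n hn h]; rfl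
  | succ m ih =>
      intro i n hm
      by_cases hn : n = 0
      · subst hn; rw [loopA_zero, scan?_zero]; rfl
      · cases h : PySem.List.pyGet? l (i + 1) with
        | none => rw [loopA_none l i n hn h, scan?_none l i n hn h]; rfl
        | some c =>
            have hlt := pyGet?_some_lt_len h
            rw [loopA_some l i n c hn h, scan?_some l i n c hn h]
            exact ih (i + 1) _ (by omega)

theorem loopA_eq_scan? (l : List Char) (i n : Int) :
    loopA l i n = (scan? l i n).getD 0 :=
  loopA_eq_scan?_aux l ((l.length : Int) - i).toNat i n (by omega)

-- a successful scan with positive depth moves the cursor at least two places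
theorem scan?_lb_aux (l : List Char) (m : Nat) :
    ∀ i n r : Int, (l.length : Int) - i ≤ m → 1 ≤ n → scan? l i n = some r → i + 2 ≤ r := by
  induction m with
  | zero =>
      intro i n r hm hn h
      rw [scan?_none l i n (by omega) (pyGet?_none_of_ge l (i + 1) (by omega))] at h
      exact absurd h (by simp)
  | succ m ih =>
      intro i n r hm hn h
      cases hg : PySem.List.pyGet? l (i + 1) with
      | none => rw [scan?_none l i n (by omega) hg] at h; exact absurd h (by simp)
      | some c =>
          have hlt := pyGet?_some_lt_len hg
          rw [scan?_some l i n c (by omega) hg] at h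
          by_cases hz : (if c = '(' then n + 1 else if c = ')' then n - 1 else n) = 0
          · rw [hz, scan?_zero] at h
            injection h with h'
            omega
          · have h1 : 1 ≤ (if c = '(' then n + 1 else if c = ')' then n - 1 else n) := by
              split_ifs at hz ⊢ <;> omega
            have := ih (i + 1) _ r (by omega) h1 h
            omega

theorem scan?_lb (l : List Char) (i n r : Int) (hn : 1 ≤ n)
    (h : scan? l i n = some r) : i + 2 ≤ r :=
  scan?_lb_aux l ((l.length : Int) - i).toNat i n r (by omega) hn h

-- depth composition: scanning down from depth n+1 first closes one level, then n more
theorem scan?_comp_aux (l : List Char) (m : Nat) :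
    ∀ i n : Int, (l.length : Int) - i ≤ m → 0 ≤ n →
      scan? l i (n + 1) = (scan? l i 1).bind (fun r => scan? l (r - 1) n) := by
  induction m using Nat.strong_induction_on with
  | _ m ih =>
      intro i n hm hn
      cases hg : PySem.List.pyGet? l (i + 1) with
      | none =>
          rw [scan?_none l i (n + 1) (by omega) hg, scan?_none l i 1 (by omega) hg]
          rfl
      | some c =>
          have hlt := pyGet?_some_lt_len hg
          have hm1 : 1 ≤ m := by omega
          rw [scan?_some l i (n + 1) c (by omega) hg, scan?_some l i 1 c (by omega) hg]
          by_cases hpo : c = '('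
          · simp only [hpo, reduceIte]
            have e1 : scan? l (i + 1) (n + 1 + 1) =
                (scan? l (i + 1) 1).bind (fun r => scan? l (r - 1) (n + 1)) :=
              ih (m - 1) (by omega) (i + 1) (n + 1) (by omega) (by omega)
            have e2 : scan? l (i + 1) (1 + 1) =
                (scan? l (i + 1) 1).bind (fun r => scan? l (r - 1) 1) :=
              ih (m - 1) (by omega) (i + 1) 1 (by omega) (by omega)
            rw [e1, e2, Option.bind_assoc]
            cases hs : scan? l (i + 1) 1 with
            | none => rfl
            | some r =>
                have hr := scan?_lb l (i + 1) 1 r le_rfl hs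
                simp only [Option.bind_some]
                exact ih (m - 2) (by omega) (r - 1) n (by omega) hn
          · by_cases hpc : c = ')'
            · subst hpc
              have e : ∀ a b : Int, (if (')' : Char) = '(' then a else b) = b :=
                fun a b => if_neg (by decide)
              simp only [reduceIte, e]
              rw [show n + 1 - 1 = n by omega, show (1 : Int) - 1 = 0 by omega, scan?_zero,
                Option.bind_some, show i + 1 + 1 - 1 = i + 1 by omega]
            · simp only [if_neg hpo, if_neg hpc]
              exact ih (m - 1) (by omega) (i + 1) n (by omega) hn

-- B's loop computes the scan result whenever the scan succeeds and the fuel dominates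
theorem loopB_eq_aux (l : List Char) :
    ∀ f : Nat, ∀ i r : Int, (l.length : Int) - i < f → scan? l (i - 1) 1 = some r →
      loopB l f i = r := by
  intro f
  induction f with
  | zero =>
      intro i r hf h
      cases hg : PySem.List.pyGet? l (i - 1 + 1) with
      | none => rw [scan?_none l (i - 1) 1 one_ne_zero hg] at h; exact absurd h (by simp)
      | some c => have := pyGet?_some_lt_len hg; omega
  | succ f ih =>
      intro i r hf h
      cases hg : PySem.List.pyGet? l i with
      | none =>
          rw [scan?_none l (i - 1) 1 one_ne_zero (by rwa [show i - 1 + 1 = i by omega])] at h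
          exact absurd h (by simp)
      | some c =>
          have hlt := pyGet?_some_lt_len hg
          have hg' : PySem.List.pyGet? l (i - 1 + 1) = some c := by rwa [show i - 1 + 1 = i by omega]
          rw [scan?_some l (i - 1) 1 c one_ne_zero hg'] at h
          rw [show i - 1 + 1 = i by omega] at h
          simp only [loopB, hg]
          by_cases hpc : c = ')'
          · subst hpc
            rw [if_pos rfl]
            rw [if_neg (by decide), if_pos rfl] at h
            rw [show (1 : Int) - 1 = 0 by omega, scan?_zero] at h
            exact Option.some.inj h
          · by_cases hpo : c = '('
            · subst hpo
              rw [if_neg (by decide), if_pos rfl]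
              rw [if_pos rfl] at h
              rw [scan?_comp_aux l ((l.length : Int) - i).toNat i 1 (by omega) (by omega)] at h
              cases hs : scan? l i 1 with
              | none => rw [hs] at h; exact absurd h (by simp)
              | some r' =>
                  rw [hs] at h
                  simp only [Option.bind_some] at h
                  have hr' := scan?_lb l i 1 r' le_rfl hs
                  have hinner : loopB l f (i + 1) = r' :=
                    ih (i + 1) r' (by omega) (by rwa [show i + 1 - 1 = i by omega])
                  rw [hinner]
                  exact ih r' r (by omega) h
            · rw [if_neg hpc, if_neg hpo]
              rw [if_neg hpo, if_neg hpc] at h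
              exact ih (i + 1) r (by omega) (by rwa [show i + 1 - 1 = i by omega])

theorem loopB_eq (l : List Char) (f : Nat) (i r : Int)
    (hf : (l.length : Int) - i < f) (h : scan? l (i - 1) 1 = some r) :
    loopB l f i = r :=
  loopB_eq_aux l f i r hf h

-- a balanced prefix of the character stream forces the scan to succeed
theorem scan?_isSome (l : List Char) (t : List Char) :
    ∀ i n : Int, 1 ≤ n →
    (∀ q : Nat, PySem.List.pyGet? l (i + 1 + q) = t[q]?) →
    (∃ j < t.length, (((t.take (j + 1)).count ')' : Int) = n + ((t.take (j + 1)).count '(' : Int))) →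
    (scan? l i n).isSome := by
  induction t with
  | nil => intro i n hn ht hw; obtain ⟨j, hj, _⟩ := hw; simp at hj
  | cons c t iht =>
      intro i n hn ht hw
      have hc : PySem.List.pyGet? l (i + 1) = some c := by simpa using ht 0
      rw [scan?_some l i n c (by omega) hc]
      obtain ⟨j, hj, hbal⟩ := hw
      have hstar : ((t.take j).count ')' : Int) =
          (if c = '(' then n + 1 else if c = ')' then n - 1 else n) + ((t.take j).count '(' : Int) := by
        simp only [List.take_succ_cons, List.count_cons, beq_iff_eq] at hbal
        push_cast at hbal
        by_cases h1 : c = '('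
        · subst h1
          rw [if_neg (by decide), if_pos rfl] at hbal
          rw [if_pos rfl]
          omega
        · by_cases h2 : c = ')'
          · subst h2
            rw [if_pos rfl, if_neg (by decide)] at hbal
            rw [if_neg (by decide), if_pos rfl]
            omega
          · rw [if_neg h2, if_neg h1] at hbal
            rw [if_neg h1, if_neg h2]
            omega
      by_cases hz : (if c = '(' then n + 1 else if c = ')' then n - 1 else n) = 0
      · rw [hz, scan?_zero]; rfl
      · have hn1 : 1 ≤ (if c = '(' then n + 1 else if c = ')' then n - 1 else n) := by
          split_ifs at hz ⊢ <;> omega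
        have hj1 : 1 ≤ j := by
          by_contra h0
          have hj0 : j = 0 := by omega
          subst hj0
          simp only [List.take_zero, List.count_nil, Nat.cast_zero] at hstar
          omega
        apply iht (i + 1) _ hn1
        · intro q
          have hq := ht (q + 1)
          rw [show i + 1 + ((q + 1 : Nat) : Int) = i + 1 + 1 + (q : Int) by push_cast; ring] at hq
          simpa using hq
        · refine ⟨j - 1, by simp at hj ⊢; omega, ?_⟩
          rw [show j - 1 + 1 = j by omega]
          exact hstar

theorem scanned_spec (data : String) (i : Int) (h : -(data.toList.length : Int) ≤ i + 1) :
    ∀ q : Nat, PySem.List.pyGet? data.toList (i + 1 + q) = (scannedChars data i)[q]? := by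
  intro q
  have hlen : data.toList.length = data.length := String.length_toList
  unfold scannedChars
  by_cases hneg : i + 1 < 0
  · rw [if_pos hneg]
    by_cases hq : (q : Int) < -(i + 1)
    · have hk : 0 < (-(i + 1 + q)).toNat := by omega
      have hk2 : (-(i + 1 + q)).toNat ≤ data.toList.length := by omega
      rw [show i + 1 + (q : Int) = -(((-(i + 1 + q)).toNat : Nat) : Int) by omega,
        PySem.List.pyGet?_neg_natCast _ _ hk hk2,
        List.getElem?_append_left (by simp; omega), List.getElem?_drop]
      congr 1
      omega
    · rw [PySem.List.pyGet?_of_nonneg _ (by omega),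
        List.getElem?_append_right (by simp; omega)]
      congr 1
      simp
      omega
  · rw [if_neg hneg]
    rw [PySem.List.pyGet?_of_nonneg _ (by omega), List.getElem?_drop]
    congr 1
    omega

-- ===== VERDICT (by name: the statement is the Claim_ definition above) =====
theorem parseSubtree_spec : Claim_equal_parseSubtree := by
  intro data i _ hpre
  obtain ⟨hlo, hw⟩ := hpre
  have hs : (scan? data.toList i 1).isSome :=
    scan?_isSome data.toList (scannedChars data i) i 1 le_rfl (scanned_spec data i hlo) hw
  obtain ⟨r, hr⟩ := Option.isSome_iff_exists.mp hs
  unfold Spec_parseSubtree parseSubtree parseSubtree_alt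
  rw [loopA_eq_scan?, hr]
  have hb : loopB data.toList (data.toList.length + i.natAbs + 2) (i + 1) = r := by
    apply loopB_eq
    · omega
    · simpa using hr
  rw [hb]; rfl
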